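-- pv_equiv track=rewrite | github.com/Torzil/SoftUni | 2. Fundamentals/8. Text Processing/winning_ticket.py | ticket_validator
-- ===== SOURCE A (Python) =====
-- def ticket_validator(ticket):
--     ticket = ticket.strip()
--     if len(ticket) != 20:
--         return "invalid ticket"
--     valid_symbols = ["@", "#", "$", "^"]
--     left_half = ticket[:10]
--     right_half = ticket[10:]
--     for current_symbol in valid_symbols:
--         for uninterrupted_match_length in range(10, 5, -1):
--             valid_symbol_repetition = current_symbol * uninterrupted_match_length
--             if valid_symbol_repetition in left_half and valid_symbol_repetition in right_half:
--                 if uninterrupted_match_length == 10: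
--                     return f'ticket "{ticket}" - {uninterrupted_match_length}{current_symbol} Jackpot!'
--                 return f'ticket "{ticket}" - {uninterrupted_match_length}{current_symbol}'
--     return f'ticket "{ticket}" - no match'
-- ===== SOURCE B (Python) =====
-- def _max_run(s, ch):
--     best = cur = 0
--     for c in s:
--         cur = cur + 1 if c == ch else 0
--         if cur > best:
--             best = cur
--     return best
--
--
-- def ticket_validator(ticket):
--     ticket = ticket.strip()
--     if len(ticket) != 20:
--         return "invalid ticket"
--     left_half = ticket[:10]
--     right_half = ticket[10:]
--     for symbol in "@#$^":
--         m = min(_max_run(left_half, symbol), _max_run(right_half, symbol))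
--         if m >= 6:
--             if m == 10:
--                 return f'ticket "{ticket}" - {m}{symbol} Jackpot!'
--             return f'ticket "{ticket}" - {m}{symbol}'
--     return f'ticket "{ticket}" - no match'
-- ===== Notes on version B (the rewrite author's own statement) =====
-- stated objective: simpler
-- what changed: A probes substring membership of sym*L for L = 10..6 in each half; B computes the longest consecutive run of each symbol in each half with one linear scan and compares min(left_run, right_run) against the 6/10 thresholds directly.
import Mathlib
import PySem

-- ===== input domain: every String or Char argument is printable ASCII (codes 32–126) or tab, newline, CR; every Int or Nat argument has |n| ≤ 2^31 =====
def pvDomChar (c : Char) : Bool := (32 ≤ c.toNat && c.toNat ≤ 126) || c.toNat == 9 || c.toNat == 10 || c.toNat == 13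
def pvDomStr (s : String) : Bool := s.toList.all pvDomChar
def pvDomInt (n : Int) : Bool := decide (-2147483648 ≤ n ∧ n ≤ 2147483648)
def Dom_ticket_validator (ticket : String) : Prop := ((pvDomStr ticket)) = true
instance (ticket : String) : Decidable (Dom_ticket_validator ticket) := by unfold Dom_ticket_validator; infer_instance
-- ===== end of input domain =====

-- B replaces A's substring probes (sym*L in half, L = 10..6) by one linear max-run scan
-- per half and symbol; objective: simpler (same asymptotic cost).

-- ===== PORT A =====
-- current_symbol * uninterrupted_match_length
def tvRepeat (sym : String) (n : Int) : String := String.ofList (PySem.List.pyRepeat sym.toList n)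

-- the inner 'for uninterrupted_match_length in range(10, 5, -1)' loop; some = early return
def tvA_inner (t left right sym : String) : List Int → Option String
  | [] => none
  | L :: rest =>
    let rep := tvRepeat sym L
    if PySem.Str.isIn rep left && PySem.Str.isIn rep right then
      if L = 10 then
        some ("ticket \"" ++ t ++ "\" - " ++ PySem.Int.toStr L ++ sym ++ " Jackpot!")
      else
        some ("ticket \"" ++ t ++ "\" - " ++ PySem.Int.toStr L ++ sym)
    else tvA_inner t left right sym rest

-- the outer 'for current_symbol in valid_symbols' loop
def tvA_outer (t left right : String) : List String → Option String
  | [] => none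
  | sym :: rest =>
    match tvA_inner t left right sym (PySem.List.pyRange 10 5 (-1)) with
    | some r => some r
    | none => tvA_outer t left right rest

def ticket_validator (ticket : String) : String :=
  let t := PySem.Str.strip ticket
  if PySem.Str.len t ≠ 20 then "invalid ticket"
  else
    let left_half := PySem.Str.slice t none (some 10)
    let right_half := PySem.Str.slice t (some 10) none
    match tvA_outer t left_half right_half ["@", "#", "$", "^"] with
    | some r => r
    | none => "ticket \"" ++ t ++ "\" - no match"

-- ===== PORT B =====
-- _max_run: longest consecutive run of ch in s, one linear scan with (best, cur)
def tvB_maxRun (s : List Char) (ch : Char) : Int :=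
  (s.foldl (fun (p : Int × Int) c =>
      let cur := if c = ch then p.2 + 1 else 0
      (max p.1 cur, cur)) (0, 0)).1

-- 'for symbol in "@#$^"' with early return
def tvB_loop (t : String) (left right : List Char) : List Char → Option String
  | [] => none
  | ch :: rest =>
    let m := min (tvB_maxRun left ch) (tvB_maxRun right ch)
    if 6 ≤ m then
      if m = 10 then
        some ("ticket \"" ++ t ++ "\" - " ++ PySem.Int.toStr m ++ String.ofList [ch] ++ " Jackpot!")
      else
        some ("ticket \"" ++ t ++ "\" - " ++ PySem.Int.toStr m ++ String.ofList [ch])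
    else tvB_loop t left right rest

def ticket_validator_alt (ticket : String) : String :=
  let t := PySem.Str.strip ticket
  if PySem.Str.len t ≠ 20 then "invalid ticket"
  else
    let left_half := PySem.Str.slice t none (some 10)
    let right_half := PySem.Str.slice t (some 10) none
    match tvB_loop t left_half.toList right_half.toList ['@', '#', '$', '^'] with
    | some r => r
    | none => "ticket \"" ++ t ++ "\" - no match"

-- ===== PRECONDITION & SPEC =====
def Spec_ticket_validator (ticket : String) (out : String) : Prop := out = ticket_validator_alt ticket
instance (ticket : String) (out : String) : Decidable (Spec_ticket_validator ticket out) := by unfold Spec_ticket_validator; infer_instance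

-- ===== CLAIM (what is proved, stated in full; the proofs are below) =====
def Claim_equal_ticket_validator : Prop := ∀ (ticket : String), Dom_ticket_validator ticket → Spec_ticket_validator ticket (ticket_validator ticket)

-- ===== LEMMAS AND PROOFS =====

-- proof-side recursive model of the scan: best run of c in l when a run of length cu just ended
def runH (c : Char) (cu : Nat) : List Char → Nat
  | [] => cu
  | x :: xs =>
    let cu' := if x = c then cu + 1 else 0
    max cu' (runH c cu' xs)

-- the current-run component of the scan
def curH (c : Char) (cu : Nat) : List Char → Nat
  | [] => cu
  | x :: xs => curH c (if x = c then cu + 1 else 0) xs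

theorem runH_cons (c x : Char) (cu : Nat) (xs : List Char) :
    runH c cu (x :: xs)
      = max (if x = c then cu + 1 else 0) (runH c (if x = c then cu + 1 else 0) xs) := rfl

theorem replicate_prefix (c : Char) {n m : Nat} (h : n ≤ m) :
    List.replicate n c <+: List.replicate m c := by
  rw [show m = n + (m - n) by omega, List.replicate_add]; exact List.prefix_append _ _

theorem runH_mono (c : Char) (l : List Char) :
    ∀ {cu cu' : Nat}, cu ≤ cu' → runH c cu l ≤ runH c cu' l := by
  induction l with
  | nil => intro cu cu' h; simpa [runH] using h
  | cons x xs ih =>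
    intro cu cu' h
    rw [runH_cons, runH_cons]
    by_cases hx : x = c
    · simp only [if_pos hx]; exact max_le_max (by omega) (ih (by omega))
    · simp only [if_neg hx]; exact max_le_max le_rfl (ih le_rfl)

theorem runH_le (c : Char) (l : List Char) : ∀ cu, runH c cu l ≤ cu + l.length := by
  induction l with
  | nil => intro cu; simp [runH]
  | cons x xs ih =>
    intro cu
    rw [runH_cons]
    simp only [List.length_cons]
    by_cases hx : x = c
    · rw [if_pos hx]; have := ih (cu + 1); exact max_le (by omega) (by omega)
    · rw [if_neg hx]; have := ih 0; exact max_le (by omega) (by omega)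

-- direction 1: a run in the scan yields a replicate-infix
theorem replicate_infix_of_runH (c : Char) (l : List Char) :
    ∀ cu n, n ≤ runH c cu l → List.replicate n c <:+: List.replicate cu c ++ l := by
  induction l with
  | nil =>
    intro cu n h
    simp only [runH] at h
    exact ((replicate_prefix c h).trans (List.prefix_append _ _)).isInfix
  | cons x xs ih =>
    intro cu n h
    rw [runH_cons] at h
    by_cases hx : x = c
    · rw [if_pos hx] at h
      subst hx
      have hcomm : List.replicate cu x ++ x :: xs = List.replicate (cu + 1) x ++ xs := by
        rw [List.replicate_succ', List.append_assoc]; rfl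
      rw [hcomm]
      rcases le_max_iff.mp h with h1 | h2
      · exact ((replicate_prefix x h1).trans (List.prefix_append _ _)).isInfix
      · exact ih (cu + 1) n h2
    · rw [if_neg hx] at h
      rcases le_max_iff.mp h with h1 | h2
      · have : n = 0 := by omega
        subst this
        exact ⟨[], List.replicate cu c ++ x :: xs, by simp⟩
      · have h3 : List.replicate n c <:+: xs := by simpa using ih 0 n h2
        exact h3.trans ⟨List.replicate cu c ++ [x], [], by simp⟩

theorem runH_drop_head (c : Char) (x : Char) (xs : List Char) (cu : Nat) :
    runH c 0 xs ≤ runH c cu (x :: xs) := by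
  rw [runH_cons]
  exact le_max_of_le_right (runH_mono c xs (Nat.zero_le _))

theorem runH_append_left (c : Char) (a l : List Char) : runH c 0 l ≤ runH c 0 (a ++ l) := by
  induction a with
  | nil => simp
  | cons x xs ih => exact ih.trans (runH_drop_head c x (xs ++ l) 0)

theorem runH_replicate (c : Char) (n : Nat) (hn : 0 < n) (b : List Char) :
    ∀ cu, cu + n ≤ runH c cu (List.replicate n c ++ b) := by
  induction n with
  | zero => omega
  | succ m ih =>
    intro cu
    rw [List.replicate_succ, List.cons_append, runH_cons, if_pos rfl]
    rcases Nat.eq_zero_or_pos m with hm | hm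
    · subst hm; simp
    · have := ih hm (cu + 1)
      exact le_max_of_le_right (by omega)

-- direction 2: a replicate-infix yields a run in the scan
theorem runH_of_replicate_infix (c : Char) (l : List Char) (n : Nat)
    (h : List.replicate n c <:+: l) : n ≤ runH c 0 l := by
  rcases Nat.eq_zero_or_pos n with hn | hn
  · omega
  · rcases h with ⟨a, b, rfl⟩
    calc n = 0 + n := by omega
    _ ≤ runH c 0 (List.replicate n c ++ b) := runH_replicate c n hn b 0
    _ ≤ runH c 0 (a ++ (List.replicate n c ++ b)) := runH_append_left _ _ _
    _ = runH c 0 (a ++ List.replicate n c ++ b) := by rw [List.append_assoc]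

-- B's Int fold computes runH (first component) and curH (second)
theorem foldl_run_eq (c : Char) (l : List Char) :
    ∀ (b cu : Nat), cu ≤ b →
      (l.foldl (fun (p : Int × Int) x =>
        let cur := if x = c then p.2 + 1 else 0
        (max p.1 cur, cur)) ((b : Int), (cu : Int)))
      = (((max b (runH c cu l) : Nat) : Int), ((curH c cu l : Nat) : Int)) := by
  induction l with
  | nil => intro b cu h; simp [runH, curH, Nat.max_eq_left h]
  | cons x xs ih =>
    intro b cu h
    rw [List.foldl_cons]
    by_cases hx : x = c
    · have hstep : (let cur := if x = c then (((b:Int),(cu:Int)) : Int × Int).2 + 1 else 0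
          (max (((b:Int),(cu:Int)) : Int × Int).1 cur, cur))
          = ((((max b (cu+1) : Nat)) : Int), (((cu+1) : Nat) : Int)) := by
        simp only [if_pos hx, Prod.mk.injEq]
        constructor <;> (push_cast; try omega)
      rw [hstep, ih (max b (cu+1)) (cu+1) (le_max_right _ _)]
      simp only [runH_cons, curH, if_pos hx, Prod.mk.injEq]
      constructor <;> (push_cast; try omega)
    · have hstep : (let cur := if x = c then (((b:Int),(cu:Int)) : Int × Int).2 + 1 else 0
          (max (((b:Int),(cu:Int)) : Int × Int).1 cur, cur))
          = (((max b 0 : Nat) : Int), ((0 : Nat) : Int)) := by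
        simp only [if_neg hx, Prod.mk.injEq]
        constructor <;> (push_cast; try omega)
      rw [hstep, ih (max b 0) 0 (Nat.zero_le _)]
      simp only [runH_cons, curH, if_neg hx, Prod.mk.injEq]
      constructor <;> (push_cast; try omega)

theorem tvB_maxRun_eq (s : List Char) (c : Char) : tvB_maxRun s c = ((runH c 0 s : Nat) : Int) := by
  unfold tvB_maxRun
  rw [show ((0:Int),(0:Int)) = (((0:Nat):Int),((0:Nat):Int)) by rfl, foldl_run_eq c s 0 0 le_rfl]
  simp

-- Python 'sym*L in half' tests run-length ≥ L of the linear scan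
theorem isIn_rep (half : String) (c : Char) (L : Int) (hL : 0 < L) :
    (PySem.Str.isIn (tvRepeat (String.ofList [c]) L) half = true)
      ↔ L ≤ ((runH c 0 half.toList : Nat) : Int) := by
  rw [PySem.Str.isIn_iff_infix]
  unfold tvRepeat
  rw [show (String.ofList [c]).toList = [c] by simp, PySem.List.pyRepeat_singleton,
    show (String.ofList (List.replicate L.toNat c)).toList = List.replicate L.toNat c by simp]
  constructor
  · intro h
    have := runH_of_replicate_infix c half.toList L.toNat h
    omega
  · intro h
    have := replicate_infix_of_runH c half.toList 0 L.toNat (by omega)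
    simpa using this

-- A's inner range(10,5,-1) loop over one symbol equals B's min-of-runs test
theorem inner_eq (t left right : String) (c : Char)
    (hl : left.toList.length ≤ 10) (hr : right.toList.length ≤ 10) :
    tvA_inner t left right (String.ofList [c]) (PySem.List.pyRange 10 5 (-1))
      = (if 6 ≤ min (tvB_maxRun left.toList c) (tvB_maxRun right.toList c) then
          some (if min (tvB_maxRun left.toList c) (tvB_maxRun right.toList c) = 10
            then "ticket \"" ++ t ++ "\" - "
              ++ PySem.Int.toStr (min (tvB_maxRun left.toList c) (tvB_maxRun right.toList c))
              ++ String.ofList [c] ++ " Jackpot!"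
            else "ticket \"" ++ t ++ "\" - "
              ++ PySem.Int.toStr (min (tvB_maxRun left.toList c) (tvB_maxRun right.toList c))
              ++ String.ofList [c])
        else none) := by
  have hml : runH c 0 left.toList ≤ 10 := (runH_le c left.toList 0).trans (by omega)
  have hmr : runH c 0 right.toList ≤ 10 := (runH_le c right.toList 0).trans (by omega)
  rw [tvB_maxRun_eq, tvB_maxRun_eq]
  rw [show PySem.List.pyRange 10 5 (-1) = [10, 9, 8, 7, 6] from rfl]
  have hmin : min ((runH c 0 left.toList : Nat) : Int) ((runH c 0 right.toList : Nat) : Int)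
      = ((min (runH c 0 left.toList) (runH c 0 right.toList) : Nat) : Int) := by push_cast; omega
  have cond_eq : ∀ L : Int, 0 < L →
      (PySem.Str.isIn (tvRepeat (String.ofList [c]) L) left
        && PySem.Str.isIn (tvRepeat (String.ofList [c]) L) right)
      = decide (L ≤ ((min (runH c 0 left.toList) (runH c 0 right.toList) : Nat) : Int)) := by
    intro L hL
    rw [Bool.eq_iff_iff]
    simp only [Bool.and_eq_true, isIn_rep left c L hL, isIn_rep right c L hL, decide_eq_true_eq]
    constructor <;> (intro h; push_cast at *; omega)
  simp only [tvA_inner]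
  rw [cond_eq 10 (by norm_num), cond_eq 9 (by norm_num), cond_eq 8 (by norm_num),
    cond_eq 7 (by norm_num), cond_eq 6 (by norm_num), hmin]
  set mN := min (runH c 0 left.toList) (runH c 0 right.toList) with hmN
  have hbound : mN ≤ 10 := by omega
  interval_cases mN <;> norm_num

-- one symbol step of the two outer loops
theorem step_eq (t left right : String) (c : Char)
    (hl : left.toList.length ≤ 10) (hr : right.toList.length ≤ 10)
    (rest : List String) (restB : List Char)
    (hrec : tvA_outer t left right rest = tvB_loop t left.toList right.toList restB) :
    tvA_outer t left right (String.ofList [c] :: rest)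
      = tvB_loop t left.toList right.toList (c :: restB) := by
  rw [tvA_outer, tvB_loop, inner_eq t left right c hl hr]
  by_cases h6 : 6 ≤ min (tvB_maxRun left.toList c) (tvB_maxRun right.toList c)
  · rw [if_pos h6, if_pos h6]
    split_ifs <;> rfl
  · rw [if_neg h6, if_neg h6, hrec]

-- ===== VERDICT (by name: the statement is the Claim_ definition above) =====
theorem ticket_validator_spec : Claim_equal_ticket_validator := by
  intro ticket _
  show ticket_validator ticket = ticket_validator_alt ticket
  unfold ticket_validator ticket_validator_alt
  dsimp only
  by_cases hlen : PySem.Str.len (PySem.Str.strip ticket) ≠ 20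
  · rw [if_pos hlen, if_pos hlen]
  · rw [if_neg hlen, if_neg hlen]
    set t := PySem.Str.strip ticket with ht
    have h20 : PySem.Str.len t = 20 := not_not.mp hlen
    rw [PySem.Str.len_eq] at h20
    have htl : t.toList.length = 20 := by exact_mod_cast h20
    have hlft : (PySem.Str.slice t none (some 10)).toList = t.toList.take 10 := by
      rw [PySem.Str.toList_slice]
      simp [pysem, PySem.List.slice_to]
    have hrgt : (PySem.Str.slice t (some 10) none).toList = t.toList.drop 10 := by
      rw [PySem.Str.toList_slice]
      simp [pysem, PySem.List.slice_from]
    have hl10 : (PySem.Str.slice t none (some 10)).toList.length ≤ 10 := by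
      rw [hlft]; simp
    have hr10 : (PySem.Str.slice t (some 10) none).toList.length ≤ 10 := by
      rw [hrgt]; simp [htl]
    have houter : tvA_outer t (PySem.Str.slice t none (some 10)) (PySem.Str.slice t (some 10) none)
        ["@", "#", "$", "^"]
        = tvB_loop t (PySem.Str.slice t none (some 10)).toList
          (PySem.Str.slice t (some 10) none).toList ['@', '#', '$', '^'] :=
      step_eq t _ _ '@' hl10 hr10 _ _
        (step_eq t _ _ '#' hl10 hr10 _ _
          (step_eq t _ _ '$' hl10 hr10 _ _
            (step_eq t _ _ '^' hl10 hr10 [] [] rfl)))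
    rw [houter]
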